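-- pv_equiv track=rewrite | github.com/Richter3766/baekjoon-algorithm | greedy/1946.py | find_max_num
-- ===== SOURCE A (Python) =====
-- import heapq
--
-- def find_max_num(num_people, info_people):
--     max_num = 1
--
--     info_people.sort()
--     i_rank_heap = [info_people[0][1]]
--     for i in range(1, num_people):
--         if info_people[i][1] < i_rank_heap[0]:
--             max_num += 1
--         heapq.heappush(i_rank_heap, info_people[i][1])
--
--     return max_num
-- ===== SOURCE B (Python) =====
-- def find_max_num(num_people, info_people):
--     info_people.sort()
--     mins = [info_people[0][1]]
--     for i in range(1, num_people):
--         mins.append(min(mins[-1], info_people[i][1]))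
--     return len(set(mins))
-- ===== Notes on version B (the rewrite author's own statement) =====
-- stated objective: simpler
-- what changed: Replaces the binary heap (heappush + heap[0] minimum queries) and the running counter with a prefix-minima list built in one pass over the sorted ranks; the answer is the number of distinct prefix minima (len(set(mins))), so no heap and no conditional counter are needed.
import Mathlib
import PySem

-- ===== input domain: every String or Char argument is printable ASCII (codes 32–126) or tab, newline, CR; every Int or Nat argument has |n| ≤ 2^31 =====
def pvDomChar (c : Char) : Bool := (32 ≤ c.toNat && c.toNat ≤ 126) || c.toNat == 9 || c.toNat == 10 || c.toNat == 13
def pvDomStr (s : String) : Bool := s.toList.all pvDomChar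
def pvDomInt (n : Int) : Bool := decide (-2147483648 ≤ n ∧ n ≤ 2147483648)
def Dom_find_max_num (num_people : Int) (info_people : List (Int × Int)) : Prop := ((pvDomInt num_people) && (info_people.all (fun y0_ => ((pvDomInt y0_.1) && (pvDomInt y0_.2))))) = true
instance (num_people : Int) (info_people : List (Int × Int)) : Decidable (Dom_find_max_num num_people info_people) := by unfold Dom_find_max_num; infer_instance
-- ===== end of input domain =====

-- B replaces A's binary heap and conditional counter by a prefix-minima list whose distinct-value
-- count is the answer (objective: simpler). Both Pythons sort info_people in place (same mutation).


-- ===== PORT A =====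
-- heapq._siftdown(heap, 0, pos) with newitem x already appended at pos: walk up while x < parent.
def heapSiftup (h : List Int) (pos : Nat) (x : Int) : List Int :=
  if hpos : 0 < pos then
    let parent := (pos - 1) / 2
    let pv := h.getD parent 0
    if x < pv then heapSiftup (h.set pos pv) parent x
    else h.set pos x
  else h.set pos x
termination_by pos
decreasing_by omega

-- heapq.heappush: append, then sift up from the new slot.
def heappush (h : List Int) (x : Int) : List Int := heapSiftup (h ++ [x]) h.length x

def find_max_num (num_people : Int) (info_people : List (Int × Int)) : Int :=
  -- info_people.sort()  (tuple sort = lexicographic)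
  let sp := PySem.List.sorted2 info_people Prod.fst Prod.snd
  match PySem.List.pyGet? sp 0 with
  | none => 0   -- Python raises IndexError here; excluded by Pre_
  | some p0 =>
    (((PySem.List.pyRange 1 num_people 1).foldl
      (fun (st : Int × List Int) i =>
        match PySem.List.pyGet? sp i with
        | none => st   -- Python raises IndexError here; excluded by Pre_
        | some pi =>
          -- i_rank_heap[0] : the heap is never empty, so plain indexing never raises
          (if pi.2 < PySem.List.pyGetD st.2 0 0 then st.1 + 1 else st.1,
           heappush st.2 pi.2))
      (1, [p0.2])).1)

-- ===== PORT B =====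
def find_max_num_alt (num_people : Int) (info_people : List (Int × Int)) : Int :=
  -- info_people.sort()
  let sp := PySem.List.sorted2 info_people Prod.fst Prod.snd
  match PySem.List.pyGet? sp 0 with
  | none => 0   -- Python raises IndexError here; excluded by Pre_
  | some p0 =>
    let mins := (PySem.List.pyRange 1 num_people 1).foldl
      (fun (acc : List Int) i =>
        match PySem.List.pyGet? sp i with
        | none => acc   -- Python raises IndexError here; excluded by Pre_
        | some pi =>
          -- mins.append(min(mins[-1], info_people[i][1])) ; mins is never empty
          acc ++ [min (PySem.List.pyGetD acc (-1) 0) pi.2])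
      [p0.2]
    ((PySem.Set.ofList mins).length : Int)   -- len(set(mins))

-- ===== PRECONDITION & SPEC =====
-- Pre_ excludes exactly the inputs where Python A raises IndexError: an empty list
-- (info_people[0]) or num_people exceeding the list length (info_people[i] in the loop).
def Pre_find_max_num (num_people : Int) (info_people : List (Int × Int)) : Prop :=
  info_people ≠ [] ∧ num_people ≤ (info_people.length : Int)
instance (num_people : Int) (info_people : List (Int × Int)) : Decidable (Pre_find_max_num num_people info_people) := by unfold Pre_find_max_num; infer_instance

def pvWitness_find_max_num : Int × (List (Int × Int)) := (2, [(1, 2), (2, 1)])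

def Spec_find_max_num (num_people : Int) (info_people : List (Int × Int)) (out : Int) : Prop := out = find_max_num_alt num_people info_people
instance (num_people : Int) (info_people : List (Int × Int)) (out : Int) : Decidable (Spec_find_max_num num_people info_people out) := by unfold Spec_find_max_num; infer_instance

-- ===== CLAIM (what is proved, stated in full; the proofs are below) =====
def Claim_equal_find_max_num : Prop := ∀ (num_people : Int) (info_people : List (Int × Int)), Dom_find_max_num num_people info_people → Pre_find_max_num num_people info_people → Spec_find_max_num num_people info_people (find_max_num num_people info_people)

-- ===== LEMMAS AND PROOFS =====

theorem heapSiftup_zero (h : List Int) (x : Int) : heapSiftup h 0 x = h.set 0 x := by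
  rw [heapSiftup]; simp

theorem siftup_spec (pos : Nat) : ∀ (h : List Int) (x : Int),
    0 < pos → pos < h.length →
    (∀ (i : Nat) (hi : i < h.length), i ≠ pos → h.getD 0 0 ≤ h[i]) →
    (heapSiftup h pos x).length = h.length ∧
    (heapSiftup h pos x).getD 0 0 = min (h.getD 0 0) x ∧
    ∀ (i : Nat) (hi : i < (heapSiftup h pos x).length), min (h.getD 0 0) x ≤ (heapSiftup h pos x)[i] := by
  induction pos using Nat.strong_induction_on with
  | _ pos ih =>
    intro h x hpos hlen hroot
    have hlen0 : 0 < h.length := by omega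
    have hgetD0 : h.getD 0 0 = h[0]'hlen0 := by
      simp [List.getD_eq_getElem?_getD, List.getElem?_eq_getElem hlen0]
    rw [heapSiftup, dif_pos hpos]
    generalize hpar : (pos - 1) / 2 = par
    have hparlt : par < pos := by omega
    have hparlen : par < h.length := by omega
    have hpv : h.getD par 0 = h[par]'hparlen := by
      simp [List.getD_eq_getElem?_getD, List.getElem?_eq_getElem hparlen]
    by_cases hx : x < h.getD par 0
    · rw [if_pos hx]
      by_cases hp0 : par = 0
      · -- parent is the root: x < root, sift places x at the root
        subst hp0
        rw [heapSiftup_zero]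
        have hxm : x < h.getD 0 0 := hx
        have hminx : min (h.getD 0 0) x = x := min_eq_right (le_of_lt hxm)
        have hset0 : ((h.set pos (h.getD 0 0)).set 0 x)[0]? = some x :=
          List.getElem?_set_self (by simp; omega)
        refine ⟨by simp, ?_, ?_⟩
        · rw [hminx, List.getD_eq_getElem?_getD, hset0]
          rfl
        · intro i hi
          rw [hminx]
          simp only [List.length_set] at hi
          rw [List.getElem_set, List.getElem_set]
          split
          · exact le_refl x
          · split
            · exact le_of_lt hxm
            · exact le_trans (le_of_lt hxm) (hroot i hi (by omega))
      · -- recurse on the parent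
        have hppos : 0 < par := by omega
        have hget0' : (h.set pos (h.getD par 0)).getD 0 0 = h.getD 0 0 := by
          simp [List.getD_eq_getElem?_getD, List.getElem?_set_ne (by omega : pos ≠ 0)]
        have hroot' : ∀ (i : Nat) (hi : i < (h.set pos (h.getD par 0)).length),
            i ≠ par →
            (h.set pos (h.getD par 0)).getD 0 0 ≤ (h.set pos (h.getD par 0))[i] := by
          intro i hi hne
          rw [hget0', List.getElem_set]
          split
          · rw [hpv]; exact hroot _ hparlen (by omega)
          · exact hroot i (by simpa using hi) (by omega)
        obtain ⟨l1, l2, l3⟩ := ih _ hparlt _ x hppos (by simpa using hparlen) hroot'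
        refine ⟨by rw [l1, List.length_set], by rw [l2, hget0'], ?_⟩
        intro i hi
        have := l3 i hi
        rwa [hget0'] at this
    · -- x ≥ parent value: place x at pos, root unchanged
      rw [if_neg hx]
      have hmx : h.getD 0 0 ≤ x := by
        have := hroot _ hparlen (by omega)
        rw [hpv] at hx; omega
      have hminm : min (h.getD 0 0) x = h.getD 0 0 := min_eq_left hmx
      refine ⟨by simp, ?_, ?_⟩
      · rw [hminm]
        simp [List.getD_eq_getElem?_getD, List.getElem?_set_ne (by omega : pos ≠ 0),
          List.getElem?_eq_getElem hlen0]
      · intro i hi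
        rw [hminm]
        simp only [List.length_set] at hi
        rw [List.getElem_set]
        split
        · exact hmx
        · exact hroot i hi (by omega)

theorem heappush_spec (h : List Int) (x : Int) (hne : h ≠ [])
    (hmin : ∀ e ∈ h, h.getD 0 0 ≤ e) :
    heappush h x ≠ [] ∧
    (heappush h x).getD 0 0 = min (h.getD 0 0) x ∧
    ∀ e ∈ heappush h x, min (h.getD 0 0) x ≤ e := by
  have hlen0 : 0 < h.length := List.length_pos_iff.mpr hne
  have hlen : h.length < (h ++ [x]).length := by simp
  have hget0 : (h ++ [x]).getD 0 0 = h.getD 0 0 := by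
    simp [List.getD_eq_getElem?_getD, List.getElem?_eq_getElem hlen0,
      List.getElem_append_left hlen0]
  have hroot : ∀ (i : Nat) (hi : i < (h ++ [x]).length), i ≠ h.length →
      (h ++ [x]).getD 0 0 ≤ (h ++ [x])[i] := by
    intro i hi hne'
    have hi' : i < h.length := by simp at hi; omega
    rw [hget0, List.getElem_append_left hi']
    exact hmin _ (List.getElem_mem hi')
  obtain ⟨l1, l2, l3⟩ := siftup_spec h.length (h ++ [x]) x hlen0 hlen hroot
  rw [hget0] at l2 l3
  refine ⟨?_, l2, ?_⟩
  · have : (heappush h x).length = (h ++ [x]).length := l1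
    intro hc
    rw [hc] at this
    simp at this
  · intro e he
    obtain ⟨i, hi, rfl⟩ := List.mem_iff_getElem.mp he
    exact l3 i hi

theorem loop_spec (sp : List (Int × Int)) (l : List Int) :
    ∀ (cnt : Int) (heap mins : List Int),
    heap ≠ [] → mins ≠ [] →
    heap.getD 0 0 = PySem.List.pyGetD mins (-1) 0 →
    (∀ e ∈ heap, heap.getD 0 0 ≤ e) →
    (∀ e ∈ mins, PySem.List.pyGetD mins (-1) 0 ≤ e) →
    cnt = ((PySem.Set.ofList mins).length : Int) →
    (l.foldl
      (fun (st : Int × List Int) i =>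
        match PySem.List.pyGet? sp i with
        | none => st
        | some pi =>
          (if pi.2 < PySem.List.pyGetD st.2 0 0 then st.1 + 1 else st.1,
           heappush st.2 pi.2)) (cnt, heap)).1
    = ((PySem.Set.ofList (l.foldl
      (fun (acc : List Int) i =>
        match PySem.List.pyGet? sp i with
        | none => acc
        | some pi => acc ++ [min (PySem.List.pyGetD acc (-1) 0) pi.2]) mins)).length : Int) := by
  induction l with
  | nil =>
    intro cnt heap mins _ _ _ _ _ hc
    simpa using hc
  | cons i t iht =>
    intro cnt heap mins hhne hmne hhm hhmin hmmin hc
    simp only [List.foldl_cons]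
    cases hg : PySem.List.pyGet? sp i with
    | none =>
      exact iht cnt heap mins hhne hmne hhm hhmin hmmin hc
    | some pi =>
      have hlast : PySem.List.pyGetD mins (-1) 0 = mins.getLast hmne :=
        PySem.List.pyGetD_neg_one mins 0 hmne
      have hget0 : PySem.List.pyGetD heap 0 0 = heap.getD 0 0 := by
        rw [PySem.List.pyGetD_zero]
      obtain ⟨p1, p2, p3⟩ := heappush_spec heap pi.2 hhne hhmin
      set m := PySem.List.pyGetD mins (-1) 0 with hm
      have hnewlast : PySem.List.pyGetD (mins ++ [min m pi.2]) (-1) 0 = min m pi.2 :=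
        PySem.List.pyGetD_neg_one_append_singleton mins (min m pi.2) 0
      apply iht
      · exact p1
      · simp
      · rw [hnewlast, p2, hhm]
      · intro e he
        rw [p2, hhm]
        rw [hhm] at p3
        exact p3 e he
      · intro e he
        rw [hnewlast]
        rcases List.mem_append.mp he with h1 | h1
        · exact le_trans (min_le_left _ _) (hmmin e h1)
        · simp at h1; omega
      · -- the counter equals the number of distinct prefix minima
        rw [PySem.Set.ofList_append_singleton, PySem.Set.add_eq_ite]
        rw [hget0, hhm]
        by_cases hlt : pi.2 < m
        · rw [if_pos hlt]
          have hmin' : min m pi.2 = pi.2 := min_eq_right (le_of_lt hlt)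
          have hnotmem : min m pi.2 ∉ PySem.Set.ofList mins := by
            rw [hmin', PySem.Set.mem_ofList]
            intro hc'
            have := hmmin _ hc'
            omega
          rw [if_neg hnotmem]
          simp [hc]
        · rw [if_neg hlt]
          have hmin' : min m pi.2 = m := min_eq_left (by omega)
          have hmem : min m pi.2 ∈ PySem.Set.ofList mins := by
            rw [hmin', PySem.Set.mem_ofList, hlast]
            exact List.getLast_mem hmne
          rw [if_pos hmem]
          exact hc

-- ===== VERDICT (by name: the statement is the Claim_ definition above) =====
theorem find_max_num_spec : Claim_equal_find_max_num := by
  intro num_people info_people _ _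
  unfold Spec_find_max_num
  simp only [find_max_num, find_max_num_alt]
  cases hg : PySem.List.pyGet? (PySem.List.sorted2 info_people Prod.fst Prod.snd) 0 with
  | none => rfl
  | some p0 =>
    have h1 : PySem.List.pyGetD [p0.2] (-1) (0 : Int) = p0.2 :=
      PySem.List.pyGetD_neg_one_append_singleton [] p0.2 0
    apply loop_spec
    · simp
    · simp
    · rw [h1]; rfl
    · intro e he; simp at he; simp [he]
    · intro e he; rw [h1]; simp at he; simp [he]
    · rfl
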